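-- pv_equiv track=rewrite | github.com/Alyfish/interior-designer | backupnew/utils/image_analysis.py | get_room_type_from_objects
-- ===== SOURCE A (Python) =====
-- from typing import Dict, Any, List, Tuple, Optional
--
-- def get_room_type_from_objects(detected_objects: List[Dict[str, Any]]) -> str:
--     """
--     Determine room type based on detected objects.
--
--     Args:
--         detected_objects: List of detected objects
--
--     Returns:
--         Room type string
--     """
--     if not detected_objects:
--         return 'Living Room'
--
--     # Room type indicators
--     bedroom_objects = {'bed', 'nightstand', 'dresser', 'wardrobe'}
--     kitchen_objects = {'refrigerator', 'microwave', 'oven', 'sink', 'stove'}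
--     bathroom_objects = {'toilet', 'sink', 'bathtub', 'shower'}
--     dining_room_objects = {'dining table', 'chair'}
--     living_room_objects = {'couch', 'sofa', 'tv', 'coffee table'}
--     office_objects = {'desk', 'computer', 'office chair', 'bookshelf'}
--
--     # Count object types
--     object_names = {obj.get('class_name', '').lower() for obj in detected_objects}
--
--     scores = {
--         'Bedroom': len(object_names & bedroom_objects),
--         'Kitchen': len(object_names & kitchen_objects),
--         'Bathroom': len(object_names & bathroom_objects),
--         'Dining Room': len(object_names & dining_room_objects),
--         'Living Room': len(object_names & living_room_objects),
--         'Office': len(object_names & office_objects)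
--     }
--
--     # Return room type with highest score
--     return max(scores, key=scores.get) if any(scores.values()) else 'Living Room'
-- ===== SOURCE B (Python) =====
-- # Inverted index: one pass over the unique lowercased names instead of six set intersections.
-- _ROOM_INDEX = {
--     'bed': ('Bedroom',), 'nightstand': ('Bedroom',), 'dresser': ('Bedroom',), 'wardrobe': ('Bedroom',),
--     'refrigerator': ('Kitchen',), 'microwave': ('Kitchen',), 'oven': ('Kitchen',), 'stove': ('Kitchen',),
--     'sink': ('Kitchen', 'Bathroom'),
--     'toilet': ('Bathroom',), 'bathtub': ('Bathroom',), 'shower': ('Bathroom',),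
--     'dining table': ('Dining Room',), 'chair': ('Dining Room',),
--     'couch': ('Living Room',), 'sofa': ('Living Room',), 'tv': ('Living Room',), 'coffee table': ('Living Room',),
--     'desk': ('Office',), 'computer': ('Office',), 'office chair': ('Office',), 'bookshelf': ('Office',),
-- }
--
-- def get_room_type_from_objects(detected_objects):
--     if not detected_objects:
--         return 'Living Room'
--     scores = {'Bedroom': 0, 'Kitchen': 0, 'Bathroom': 0,
--               'Dining Room': 0, 'Living Room': 0, 'Office': 0}
--     for name in {obj.get('class_name', '').lower() for obj in detected_objects}:
--         for room in _ROOM_INDEX.get(name, ()):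
--             scores[room] += 1
--     return max(scores, key=scores.get) if any(scores.values()) else 'Living Room'
-- ===== Notes on version B (the rewrite author's own statement) =====
-- stated objective: idiomatic
-- what changed: Replaces the six per-room set intersections with a single inverted index (object name -> rooms it signals) and one pass over the unique lowercased names incrementing a scores dict, keeping the original room order and fallbacks for identical tie-breaking.
import Mathlib
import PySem

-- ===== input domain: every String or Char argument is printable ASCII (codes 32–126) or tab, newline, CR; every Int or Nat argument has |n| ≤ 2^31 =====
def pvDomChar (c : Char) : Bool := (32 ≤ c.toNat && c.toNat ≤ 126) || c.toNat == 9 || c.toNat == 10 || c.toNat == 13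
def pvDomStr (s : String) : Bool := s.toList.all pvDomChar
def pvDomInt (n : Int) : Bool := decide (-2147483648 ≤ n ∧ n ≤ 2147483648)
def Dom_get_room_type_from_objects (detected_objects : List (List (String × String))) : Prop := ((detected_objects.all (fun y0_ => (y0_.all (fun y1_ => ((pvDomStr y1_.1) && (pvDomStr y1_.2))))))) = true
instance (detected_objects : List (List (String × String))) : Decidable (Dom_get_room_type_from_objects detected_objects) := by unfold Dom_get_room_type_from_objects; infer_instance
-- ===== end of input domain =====

-- B replaces A's six per-room set intersections by an inverted index (name -> rooms) and one
-- incrementing pass over the unique names; same room order, same fallbacks (idiomatic rewrite).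

-- ===== PORT A =====
-- Python max(scores, key=scores.get) over a dict with distinct keys: first pair of maximal value.
def pvMaxByVal (scores : List (String × Int)) : String :=
  match PySem.List.max? scores (fun p => p.2) with
  | some p => p.1
  | none => ""

def pvBedroomObjects : PySem.Set String := PySem.Set.ofList ["bed", "nightstand", "dresser", "wardrobe"]
def pvKitchenObjects : PySem.Set String := PySem.Set.ofList ["refrigerator", "microwave", "oven", "sink", "stove"]
def pvBathroomObjects : PySem.Set String := PySem.Set.ofList ["toilet", "sink", "bathtub", "shower"]
def pvDiningRoomObjects : PySem.Set String := PySem.Set.ofList ["dining table", "chair"]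
def pvLivingRoomObjects : PySem.Set String := PySem.Set.ofList ["couch", "sofa", "tv", "coffee table"]
def pvOfficeObjects : PySem.Set String := PySem.Set.ofList ["desk", "computer", "office chair", "bookshelf"]

def get_room_type_from_objects (detected_objects : List (List (String × String))) : String :=
  if detected_objects.isEmpty then "Living Room" else
  let object_names : PySem.Set String :=
    PySem.Set.ofList (detected_objects.map (fun obj =>
      PySem.Str.lower (PySem.Dict.getD (PySem.Dict.mk obj) "class_name" "")))
  let scores : List (String × Int) :=
    [("Bedroom", ((PySem.Set.inter object_names pvBedroomObjects).length : Int)),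
     ("Kitchen", ((PySem.Set.inter object_names pvKitchenObjects).length : Int)),
     ("Bathroom", ((PySem.Set.inter object_names pvBathroomObjects).length : Int)),
     ("Dining Room", ((PySem.Set.inter object_names pvDiningRoomObjects).length : Int)),
     ("Living Room", ((PySem.Set.inter object_names pvLivingRoomObjects).length : Int)),
     ("Office", ((PySem.Set.inter object_names pvOfficeObjects).length : Int))]
  if scores.any (fun p => p.2 != 0) then pvMaxByVal scores else "Living Room"

-- ===== PORT B =====
def pvRoomIndex : PySem.Dict String (List String) := PySem.Dict.mk
  [("bed", ["Bedroom"]), ("nightstand", ["Bedroom"]), ("dresser", ["Bedroom"]), ("wardrobe", ["Bedroom"]),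
   ("refrigerator", ["Kitchen"]), ("microwave", ["Kitchen"]), ("oven", ["Kitchen"]), ("stove", ["Kitchen"]),
   ("sink", ["Kitchen", "Bathroom"]),
   ("toilet", ["Bathroom"]), ("bathtub", ["Bathroom"]), ("shower", ["Bathroom"]),
   ("dining table", ["Dining Room"]), ("chair", ["Dining Room"]),
   ("couch", ["Living Room"]), ("sofa", ["Living Room"]), ("tv", ["Living Room"]), ("coffee table", ["Living Room"]),
   ("desk", ["Office"]), ("computer", ["Office"]), ("office chair", ["Office"]), ("bookshelf", ["Office"])]

-- scores[room] += 1: every room the index yields is a key of scores, so the in-place update is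
-- exactly this map over the fixed six-pair list (Python would raise only on a missing key, which
-- cannot occur here).
def pvBump (scores : List (String × Int)) (room : String) : List (String × Int) :=
  scores.map (fun p => if p.1 == room then (p.1, p.2 + 1) else p)

def pvStep (sc : List (String × Int)) (n : String) : List (String × Int) :=
  (PySem.Dict.getD pvRoomIndex n []).foldl pvBump sc

def get_room_type_from_objects_alt (detected_objects : List (List (String × String))) : String :=
  if detected_objects.isEmpty then "Living Room" else
  let names : PySem.Set String :=
    PySem.Set.ofList (detected_objects.map (fun obj =>
      PySem.Str.lower (PySem.Dict.getD (PySem.Dict.mk obj) "class_name" "")))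
  let scores := names.foldl pvStep
    [("Bedroom", (0 : Int)), ("Kitchen", 0), ("Bathroom", 0),
     ("Dining Room", 0), ("Living Room", 0), ("Office", 0)]
  if scores.any (fun p => p.2 != 0) then pvMaxByVal scores else "Living Room"

-- ===== PRECONDITION & SPEC =====
def Spec_get_room_type_from_objects (detected_objects : List (List (String × String))) (out : String) : Prop := out = get_room_type_from_objects_alt detected_objects
instance (detected_objects : List (List (String × String))) (out : String) : Decidable (Spec_get_room_type_from_objects detected_objects out) := by unfold Spec_get_room_type_from_objects; infer_instance

-- ===== CLAIM (what is proved, stated in full; the proofs are below) =====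
def Claim_equal_get_room_type_from_objects : Prop := ∀ (detected_objects : List (List (String × String))), Dom_get_room_type_from_objects detected_objects → Spec_get_room_type_from_objects detected_objects (get_room_type_from_objects detected_objects)

-- ===== LEMMAS AND PROOFS =====

-- indicator: 1 if the room set contains the name
def pvInd (l : List String) (n : String) : Int := if n ∈ l then 1 else 0

def pvCnt (ns : List String) (l : PySem.Set String) : Int := ((PySem.Set.inter ns l).length : Int)

lemma pvCnt_cons (n : String) (ns : List String) (l : PySem.Set String) :
    pvCnt (n :: ns) l = pvInd l n + pvCnt ns l := by
  by_cases h : n ∈ l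
  · simp [pvCnt, pvInd, PySem.Set.inter, List.filter, h]
    omega
  · simp [pvCnt, pvInd, PySem.Set.inter, List.filter, h]

lemma pvStep_eff (n : String) (a b c d e f : Int) :
    pvStep [("Bedroom", a), ("Kitchen", b), ("Bathroom", c),
            ("Dining Room", d), ("Living Room", e), ("Office", f)] n
    = [("Bedroom", a + pvInd pvBedroomObjects n), ("Kitchen", b + pvInd pvKitchenObjects n),
       ("Bathroom", c + pvInd pvBathroomObjects n), ("Dining Room", d + pvInd pvDiningRoomObjects n),
       ("Living Room", e + pvInd pvLivingRoomObjects n), ("Office", f + pvInd pvOfficeObjects n)] := by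
  by_cases h0 : n = "bed"
  · subst h0
    have hg : PySem.Dict.getD pvRoomIndex "bed" [] = ["Bedroom"] := rfl
    simp [pvStep, hg, pvBump, pvInd, pvBedroomObjects, pvKitchenObjects, pvBathroomObjects, pvDiningRoomObjects, pvLivingRoomObjects, pvOfficeObjects, PySem.Set.ofList]
  by_cases h1 : n = "nightstand"
  · subst h1
    have hg : PySem.Dict.getD pvRoomIndex "nightstand" [] = ["Bedroom"] := rfl
    simp [pvStep, hg, pvBump, pvInd, pvBedroomObjects, pvKitchenObjects, pvBathroomObjects, pvDiningRoomObjects, pvLivingRoomObjects, pvOfficeObjects, PySem.Set.ofList]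
  by_cases h2 : n = "dresser"
  · subst h2
    have hg : PySem.Dict.getD pvRoomIndex "dresser" [] = ["Bedroom"] := rfl
    simp [pvStep, hg, pvBump, pvInd, pvBedroomObjects, pvKitchenObjects, pvBathroomObjects, pvDiningRoomObjects, pvLivingRoomObjects, pvOfficeObjects, PySem.Set.ofList]
  by_cases h3 : n = "wardrobe"
  · subst h3
    have hg : PySem.Dict.getD pvRoomIndex "wardrobe" [] = ["Bedroom"] := rfl
    simp [pvStep, hg, pvBump, pvInd, pvBedroomObjects, pvKitchenObjects, pvBathroomObjects, pvDiningRoomObjects, pvLivingRoomObjects, pvOfficeObjects, PySem.Set.ofList]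
  by_cases h4 : n = "refrigerator"
  · subst h4
    have hg : PySem.Dict.getD pvRoomIndex "refrigerator" [] = ["Kitchen"] := rfl
    simp [pvStep, hg, pvBump, pvInd, pvBedroomObjects, pvKitchenObjects, pvBathroomObjects, pvDiningRoomObjects, pvLivingRoomObjects, pvOfficeObjects, PySem.Set.ofList]
  by_cases h5 : n = "microwave"
  · subst h5
    have hg : PySem.Dict.getD pvRoomIndex "microwave" [] = ["Kitchen"] := rfl
    simp [pvStep, hg, pvBump, pvInd, pvBedroomObjects, pvKitchenObjects, pvBathroomObjects, pvDiningRoomObjects, pvLivingRoomObjects, pvOfficeObjects, PySem.Set.ofList]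
  by_cases h6 : n = "oven"
  · subst h6
    have hg : PySem.Dict.getD pvRoomIndex "oven" [] = ["Kitchen"] := rfl
    simp [pvStep, hg, pvBump, pvInd, pvBedroomObjects, pvKitchenObjects, pvBathroomObjects, pvDiningRoomObjects, pvLivingRoomObjects, pvOfficeObjects, PySem.Set.ofList]
  by_cases h7 : n = "stove"
  · subst h7
    have hg : PySem.Dict.getD pvRoomIndex "stove" [] = ["Kitchen"] := rfl
    simp [pvStep, hg, pvBump, pvInd, pvBedroomObjects, pvKitchenObjects, pvBathroomObjects, pvDiningRoomObjects, pvLivingRoomObjects, pvOfficeObjects, PySem.Set.ofList]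
  by_cases h8 : n = "sink"
  · subst h8
    have hg : PySem.Dict.getD pvRoomIndex "sink" [] = ["Kitchen", "Bathroom"] := rfl
    simp [pvStep, hg, pvBump, pvInd, pvBedroomObjects, pvKitchenObjects, pvBathroomObjects, pvDiningRoomObjects, pvLivingRoomObjects, pvOfficeObjects, PySem.Set.ofList]
  by_cases h9 : n = "toilet"
  · subst h9
    have hg : PySem.Dict.getD pvRoomIndex "toilet" [] = ["Bathroom"] := rfl
    simp [pvStep, hg, pvBump, pvInd, pvBedroomObjects, pvKitchenObjects, pvBathroomObjects, pvDiningRoomObjects, pvLivingRoomObjects, pvOfficeObjects, PySem.Set.ofList]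
  by_cases h10 : n = "bathtub"
  · subst h10
    have hg : PySem.Dict.getD pvRoomIndex "bathtub" [] = ["Bathroom"] := rfl
    simp [pvStep, hg, pvBump, pvInd, pvBedroomObjects, pvKitchenObjects, pvBathroomObjects, pvDiningRoomObjects, pvLivingRoomObjects, pvOfficeObjects, PySem.Set.ofList]
  by_cases h11 : n = "shower"
  · subst h11
    have hg : PySem.Dict.getD pvRoomIndex "shower" [] = ["Bathroom"] := rfl
    simp [pvStep, hg, pvBump, pvInd, pvBedroomObjects, pvKitchenObjects, pvBathroomObjects, pvDiningRoomObjects, pvLivingRoomObjects, pvOfficeObjects, PySem.Set.ofList]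
  by_cases h12 : n = "dining table"
  · subst h12
    have hg : PySem.Dict.getD pvRoomIndex "dining table" [] = ["Dining Room"] := rfl
    simp [pvStep, hg, pvBump, pvInd, pvBedroomObjects, pvKitchenObjects, pvBathroomObjects, pvDiningRoomObjects, pvLivingRoomObjects, pvOfficeObjects, PySem.Set.ofList]
  by_cases h13 : n = "chair"
  · subst h13
    have hg : PySem.Dict.getD pvRoomIndex "chair" [] = ["Dining Room"] := rfl
    simp [pvStep, hg, pvBump, pvInd, pvBedroomObjects, pvKitchenObjects, pvBathroomObjects, pvDiningRoomObjects, pvLivingRoomObjects, pvOfficeObjects, PySem.Set.ofList]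
  by_cases h14 : n = "couch"
  · subst h14
    have hg : PySem.Dict.getD pvRoomIndex "couch" [] = ["Living Room"] := rfl
    simp [pvStep, hg, pvBump, pvInd, pvBedroomObjects, pvKitchenObjects, pvBathroomObjects, pvDiningRoomObjects, pvLivingRoomObjects, pvOfficeObjects, PySem.Set.ofList]
  by_cases h15 : n = "sofa"
  · subst h15
    have hg : PySem.Dict.getD pvRoomIndex "sofa" [] = ["Living Room"] := rfl
    simp [pvStep, hg, pvBump, pvInd, pvBedroomObjects, pvKitchenObjects, pvBathroomObjects, pvDiningRoomObjects, pvLivingRoomObjects, pvOfficeObjects, PySem.Set.ofList]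
  by_cases h16 : n = "tv"
  · subst h16
    have hg : PySem.Dict.getD pvRoomIndex "tv" [] = ["Living Room"] := rfl
    simp [pvStep, hg, pvBump, pvInd, pvBedroomObjects, pvKitchenObjects, pvBathroomObjects, pvDiningRoomObjects, pvLivingRoomObjects, pvOfficeObjects, PySem.Set.ofList]
  by_cases h17 : n = "coffee table"
  · subst h17
    have hg : PySem.Dict.getD pvRoomIndex "coffee table" [] = ["Living Room"] := rfl
    simp [pvStep, hg, pvBump, pvInd, pvBedroomObjects, pvKitchenObjects, pvBathroomObjects, pvDiningRoomObjects, pvLivingRoomObjects, pvOfficeObjects, PySem.Set.ofList]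
  by_cases h18 : n = "desk"
  · subst h18
    have hg : PySem.Dict.getD pvRoomIndex "desk" [] = ["Office"] := rfl
    simp [pvStep, hg, pvBump, pvInd, pvBedroomObjects, pvKitchenObjects, pvBathroomObjects, pvDiningRoomObjects, pvLivingRoomObjects, pvOfficeObjects, PySem.Set.ofList]
  by_cases h19 : n = "computer"
  · subst h19
    have hg : PySem.Dict.getD pvRoomIndex "computer" [] = ["Office"] := rfl
    simp [pvStep, hg, pvBump, pvInd, pvBedroomObjects, pvKitchenObjects, pvBathroomObjects, pvDiningRoomObjects, pvLivingRoomObjects, pvOfficeObjects, PySem.Set.ofList]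
  by_cases h20 : n = "office chair"
  · subst h20
    have hg : PySem.Dict.getD pvRoomIndex "office chair" [] = ["Office"] := rfl
    simp [pvStep, hg, pvBump, pvInd, pvBedroomObjects, pvKitchenObjects, pvBathroomObjects, pvDiningRoomObjects, pvLivingRoomObjects, pvOfficeObjects, PySem.Set.ofList]
  by_cases h21 : n = "bookshelf"
  · subst h21
    have hg : PySem.Dict.getD pvRoomIndex "bookshelf" [] = ["Office"] := rfl
    simp [pvStep, hg, pvBump, pvInd, pvBedroomObjects, pvKitchenObjects, pvBathroomObjects, pvDiningRoomObjects, pvLivingRoomObjects, pvOfficeObjects, PySem.Set.ofList]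
  · have hg : PySem.Dict.getD pvRoomIndex n [] = [] := by
      have hnone : PySem.Dict.get? pvRoomIndex n = none :=
        (PySem.Dict.get?_eq_none_iff_not_mem_keys _ _).mpr (by simp [pvRoomIndex, h0, h1, h2, h3, h4, h5, h6, h7, h8, h9, h10, h11, h12, h13, h14, h15, h16, h17, h18, h19, h20, h21])
      rw [PySem.Dict.getD_eq_get?_getD, hnone]; rfl
    simp [pvStep, hg, pvInd, pvBedroomObjects, pvKitchenObjects, pvBathroomObjects, pvDiningRoomObjects, pvLivingRoomObjects, pvOfficeObjects, PySem.Set.ofList, h0, h1, h2, h3, h4, h5, h6, h7, h8, h9, h10, h11, h12, h13, h14, h15, h16, h17, h18, h19, h20, h21]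
lemma pvFold_eff (ns : List String) (a b c d e f : Int) :
    ns.foldl pvStep [("Bedroom", a), ("Kitchen", b), ("Bathroom", c),
                     ("Dining Room", d), ("Living Room", e), ("Office", f)]
    = [("Bedroom", a + pvCnt ns pvBedroomObjects), ("Kitchen", b + pvCnt ns pvKitchenObjects),
       ("Bathroom", c + pvCnt ns pvBathroomObjects), ("Dining Room", d + pvCnt ns pvDiningRoomObjects),
       ("Living Room", e + pvCnt ns pvLivingRoomObjects), ("Office", f + pvCnt ns pvOfficeObjects)] := by
  induction ns generalizing a b c d e f with
  | nil => simp [pvCnt, PySem.Set.inter]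
  | cons n tl ih =>
      simp only [List.foldl_cons, pvStep_eff, ih, pvCnt_cons]
      ring_nf

-- ===== VERDICT (by name: the statement is the Claim_ definition above) =====
theorem get_room_type_from_objects_spec : Claim_equal_get_room_type_from_objects := by
  intro d _
  unfold Spec_get_room_type_from_objects get_room_type_from_objects get_room_type_from_objects_alt
  by_cases hd : d.isEmpty
  · simp [hd]
  · simp only [hd, if_false, Bool.false_eq_true]
    rw [pvFold_eff]
    simp [pvCnt]
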